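-- pv_equiv track=rewrite | github.com/kkarczewski/python-simple-exercises | readwrrite.py | rewerse
-- ===== SOURCE A (Python) =====
-- def rewerse(data):
--     letters = list()
--     words = [one.split(' ') for one in data]
--     for line in words[::-1]:
--        new_line = list()
--        for word in line[::-1]:
--            new_line.append(word[::-1])
--        new_line = (' ').join(new_line)
--        new_line += '\n'
--        letters.append(new_line)
--     return letters
-- ===== SOURCE B (Python) =====
-- def rewerse(data):
--     return [line[::-1] + '\n' for line in reversed(data)]
-- ===== Notes on version B (the rewrite author's own statement) =====
-- stated objective: simpler
-- what changed: Replaces the split-on-space / reverse-words / reverse-each-word / join machinery with a single whole-string reversal per line, using the identity that reversing word order and each word equals reversing the line.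
import Mathlib
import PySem

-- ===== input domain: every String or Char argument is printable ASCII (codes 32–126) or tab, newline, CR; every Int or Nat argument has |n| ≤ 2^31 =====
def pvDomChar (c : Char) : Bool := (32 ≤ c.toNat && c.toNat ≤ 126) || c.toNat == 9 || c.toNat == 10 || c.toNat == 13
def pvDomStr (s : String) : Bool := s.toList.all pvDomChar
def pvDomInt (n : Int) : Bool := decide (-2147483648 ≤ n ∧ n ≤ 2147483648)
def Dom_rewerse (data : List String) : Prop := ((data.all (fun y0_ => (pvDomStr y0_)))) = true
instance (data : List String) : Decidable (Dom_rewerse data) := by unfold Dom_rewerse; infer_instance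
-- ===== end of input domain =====

-- B replaces A's split/reverse-words/reverse-each-word/join machinery with one whole-line
-- string reversal per line (simpler; same result since the two operations coincide).

-- ===== PORT A =====
def rewerse (data : List String) : List String :=
  -- words = [one.split(' ') for one in data]
  let words : List (List String) := data.map (fun one => (PySem.Str.split? one " ").getD [])
  -- for line in words[::-1]: …
  ((PySem.List.slice? words none none (-1)).getD []).foldl
    (fun letters line =>
      -- inner loop: for word in line[::-1]: new_line.append(word[::-1])
      let new_line : List String :=
        ((PySem.List.slice? line none none (-1)).getD []).foldl
          (fun nl word => nl ++ [(PySem.Str.slice? word none none (-1)).getD ""]) []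
      -- new_line = ' '.join(new_line); new_line += '\n'; letters.append(new_line)
      letters ++ [String.ofList ((PySem.Str.join " " new_line).toList ++ ['\n'])]) []

-- ===== PORT B =====
def rewerse_alt (data : List String) : List String :=
  -- [line[::-1] + '\n' for line in reversed(data)]
  data.reverse.map (fun line =>
    String.ofList (((PySem.Str.slice? line none none (-1)).getD "").toList ++ ['\n']))

-- ===== PRECONDITION & SPEC =====
def Spec_rewerse (data : List String) (out : List String) : Prop := out = rewerse_alt data
instance (data : List String) (out : List String) : Decidable (Spec_rewerse data out) := by unfold Spec_rewerse; infer_instance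

-- ===== CLAIM (what is proved, stated in full; the proofs are below) =====
def Claim_equal_rewerse : Prop := ∀ (data : List String), Dom_rewerse data → Spec_rewerse data (rewerse data)

-- ===== LEMMAS AND PROOFS =====

-- prepend a prefix onto the first piece of a split
def pvConsHead (p : List Char) : List (List Char) → List (List Char)
  | [] => [p]
  | h :: t => (p ++ h) :: t

-- reference split on a single space, structural recursion
def pvSplit : List Char → List (List Char)
  | [] => [[]]
  | c :: rest => if c = ' ' then [] :: pvSplit rest else pvConsHead [c] (pvSplit rest)

theorem pvSplit_ne_nil (cs : List Char) : pvSplit cs ≠ [] := by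
  cases cs with
  | nil => simp [pvSplit]
  | cons c rest =>
    simp only [pvSplit]
    split
    · simp
    · cases h : pvSplit rest <;> simp [pvConsHead]

theorem pv_splitOn_go (l : List Char) :
    ∀ (fuel : Nat) (cur : List Char) (acc : List (List Char)), l.length ≤ fuel →
      PySem.Chars.splitOn.go [' '] fuel l cur acc
        = acc.reverse ++ pvConsHead cur.reverse (pvSplit l) := by
  induction l with
  | nil =>
    intro fuel cur acc _
    cases fuel <;> simp [PySem.Chars.splitOn.go, pvSplit, pvConsHead]
  | cons c rest ih =>
    intro fuel cur acc hle
    cases fuel with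
    | zero => simp at hle
    | succ f =>
      by_cases hc : c = ' '
      · subst hc
        have hpre : ([' '] : List Char).isPrefixOf (' ' :: rest) = true := by
          simp [List.isPrefixOf]
        rw [show PySem.Chars.splitOn.go [' '] (f+1) (' ' :: rest) cur acc
              = PySem.Chars.splitOn.go [' '] f (List.drop 1 (' ' :: rest)) [] (cur.reverse :: acc) from by
            simp [PySem.Chars.splitOn.go, hpre]]
        simp only [List.drop_succ_cons, List.drop_zero]
        rw [ih f [] (cur.reverse :: acc) (by simpa using Nat.le_of_succ_le_succ hle)]
        cases h : pvSplit rest with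
        | nil => exact absurd h (pvSplit_ne_nil rest)
        | cons h0 t0 =>
          simp [pvSplit, pvConsHead, h]
      · have hpre : ([' '] : List Char).isPrefixOf (c :: rest) = false := by
          simp [List.isPrefixOf]
          exact fun h => absurd h.symm hc
        rw [show PySem.Chars.splitOn.go [' '] (f+1) (c :: rest) cur acc
              = PySem.Chars.splitOn.go [' '] f rest (c :: cur) acc from by
            simp [PySem.Chars.splitOn.go, hpre]]
        rw [ih f (c :: cur) acc (by simpa using Nat.le_of_succ_le_succ hle)]
        cases h : pvSplit rest with
        | nil => exact absurd h (pvSplit_ne_nil rest)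
        | cons h0 t0 =>
          simp [pvSplit, pvConsHead, h, hc]

theorem pv_splitOn_space (cs : List Char) :
    PySem.Chars.splitOn cs [' '] = pvSplit cs := by
  unfold PySem.Chars.splitOn
  rw [pv_splitOn_go cs (cs.length + 1) [] [] (Nat.le_succ _)]
  cases h : pvSplit cs with
  | nil => exact absurd h (pvSplit_ne_nil cs)
  | cons h0 t0 => simp [pvConsHead]

theorem pv_join_pvSplit (cs : List Char) :
    PySem.Chars.join [' '] (pvSplit cs) = cs := by
  induction cs with
  | nil => simp [pvSplit, PySem.Chars.join_singleton]
  | cons c rest ih =>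
    by_cases hc : c = ' '
    · subst hc
      have hs : pvSplit (' ' :: rest) = [] :: pvSplit rest := by simp [pvSplit]
      rw [hs]
      cases h : pvSplit rest with
      | nil => exact absurd h (pvSplit_ne_nil rest)
      | cons h0 t0 =>
        rw [h] at ih
        rw [PySem.Chars.join_cons_cons]
        simpa using ih
    · simp only [pvSplit, if_neg hc]
      cases h : pvSplit rest with
      | nil => exact absurd h (pvSplit_ne_nil rest)
      | cons h0 t0 =>
        rw [h] at ih
        cases t0 with
        | nil =>
          simp [pvConsHead, PySem.Chars.join_singleton] at ih ⊢
          simp [ih]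
        | cons t1 t2 =>
          simp only [pvConsHead]
          rw [PySem.Chars.join_cons_cons] at ih ⊢
          simp at ih ⊢
          simp [ih]

theorem pv_join_append_singleton (sep p : List Char) :
    ∀ (parts : List (List Char)), parts ≠ [] →
      PySem.Chars.join sep (parts ++ [p]) = PySem.Chars.join sep parts ++ sep ++ p := by
  intro parts
  induction parts with
  | nil => intro h; exact absurd rfl h
  | cons q rest ih =>
    intro _
    cases rest with
    | nil => simp [PySem.Chars.join_cons_cons, PySem.Chars.join_singleton]
    | cons r rs =>
      simp only [List.cons_append]
      rw [PySem.Chars.join_cons_cons]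
      have := ih (by simp)
      simp only [List.cons_append] at this
      rw [this, PySem.Chars.join_cons_cons]
      simp

theorem pv_join_rev (c : Char) :
    ∀ (parts : List (List Char)),
      PySem.Chars.join [c] (parts.reverse.map List.reverse)
        = (PySem.Chars.join [c] parts).reverse := by
  intro parts
  induction parts with
  | nil => simp [PySem.Chars.join_nil]
  | cons p ps ih =>
    cases ps with
    | nil => simp [PySem.Chars.join_singleton]
    | cons q qs =>
      have hne : ((q :: qs).reverse.map List.reverse) ≠ [] := by simp
      rw [show ((p :: q :: qs).reverse.map List.reverse)
            = ((q :: qs).reverse.map List.reverse) ++ [p.reverse] from by simp]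
      rw [pv_join_append_singleton _ _ _ hne, ih, PySem.Chars.join_cons_cons]
      simp

-- per-line identity at the Chars level
theorem pv_line (cs : List Char) :
    PySem.Chars.join [' '] ((pvSplit cs).reverse.map List.reverse) = cs.reverse := by
  rw [pv_join_rev, pv_join_pvSplit]

-- the same identity lifted to one line of A's loop body
theorem pv_line_str (one : String) :
    PySem.Str.join " "
        ((((PySem.Str.split? one " ").getD []).reverse).map
          (fun w => (PySem.Str.slice? w none none (-1)).getD ""))
      = (PySem.Str.slice? one none none (-1)).getD "" := by
  have hsplit : PySem.Str.split? one " " =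
      some ((pvSplit one.toList).map String.ofList) := by
    simp [PySem.Str.split?, PySem.Chars.split?,
      show (" " : String).toList = [' '] from rfl, pv_splitOn_space]
  rw [hsplit]
  simp only [Option.getD_some, PySem.Str.slice?_none_none_neg_one, PySem.Str.join,
    ← List.map_reverse, List.map_map]
  apply congrArg
  rw [show (" " : String).toList = [' '] from rfl]
  have hmap : ((pvSplit one.toList).reverse.map
        (String.toList ∘ (fun w => String.ofList w.toList.reverse) ∘ String.ofList))
      = (pvSplit one.toList).reverse.map List.reverse := by
    apply List.map_congr_left
    intro w _
    simp
  rw [hmap, pv_line]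

-- ===== VERDICT (by name: the statement is the Claim_ definition above) =====
theorem rewerse_spec : Claim_equal_rewerse := by
  intro data _
  unfold Spec_rewerse rewerse rewerse_alt
  simp only [PySem.List.slice?_none_none_neg_one, Option.getD_some,
    PySem.List.foldl_append_singleton_eq_map, List.nil_append,
    ← List.map_reverse, List.map_map]
  apply List.map_congr_left
  intro one _
  simp only [Function.comp]
  rw [pv_line_str]
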